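-- pv_equiv track=rewrite | github.com/batatavada/blockchainedDB | block_header_hash.py | little_endian
-- ===== SOURCE A (Python) =====
-- def little_endian(hex):
-- 	littleEndian = "";
-- 	if len(hex) % 2 != 0:
-- 	    return littleEndian
--
-- 	for x in reversed(hex):
-- 		littleEndian = littleEndian + hex[-2:]
-- 		hex = hex[:-2]
-- 	return littleEndian
-- ===== SOURCE B (Python) =====
-- def little_endian(hex):
-- 	out = ""
-- 	if len(hex) % 2 != 0:
-- 		return out
-- 	r = hex[::-1]
-- 	while r:
-- 		out += r[1] + r[0]
-- 		r = r[2:]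
-- 	return out
-- ===== Notes on version B (the rewrite author's own statement) =====
-- stated objective: alternative
-- what changed: B reverses the whole string once (hex[::-1]) and then walks it front-to-back swapping each character pair, instead of A's loop that repeatedly takes the last two characters off the original string (with len(hex) wasted no-op iterations once it is empty).
import Mathlib
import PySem

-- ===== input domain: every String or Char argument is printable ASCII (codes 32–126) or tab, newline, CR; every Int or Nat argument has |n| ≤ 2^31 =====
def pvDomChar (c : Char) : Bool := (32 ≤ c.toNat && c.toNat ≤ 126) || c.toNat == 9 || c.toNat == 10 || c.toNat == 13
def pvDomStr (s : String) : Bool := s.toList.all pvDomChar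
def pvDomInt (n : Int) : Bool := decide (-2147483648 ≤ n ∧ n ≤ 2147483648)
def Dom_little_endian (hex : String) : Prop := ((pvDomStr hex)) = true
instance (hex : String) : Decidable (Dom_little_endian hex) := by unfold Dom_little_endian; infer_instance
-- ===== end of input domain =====

-- B reverses the whole string once and swaps each pair front-to-back, instead of A's
-- repeated take-last-two-and-truncate loop; an alternative decomposition of equal cost.


-- ===== PORT A =====
-- A's loop: 'for x in reversed(hex)' iterates len(hex) times (over the ORIGINAL string,
-- captured by reversed() before hex is reassigned); each step appends hex[-2:] and sets
-- hex = hex[:-2].  fuel carries reversed(hex); cur is the shrinking hex.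
def pvALoop : List Char → List Char → List Char → List Char
  | [], _, acc => acc
  | _ :: fs, cur, acc =>
      pvALoop fs (PySem.List.slice cur none (some (-2)))
        (acc ++ PySem.List.slice cur (some (-2)) none)

def little_endian (hex : String) : String :=
  if PySem.Int.mod (PySem.Str.len hex) 2 ≠ 0 then ""
  else String.ofList (pvALoop hex.toList.reverse hex.toList [])

-- ===== PORT B =====
-- B's while loop: out += r[1] + r[0]; r = r[2:]  (r[2:] on x::y::t is t, PySem.List.slice_from_natCast).
-- The [_] arm is unreachable for even-length input (Python's r[1] would raise there).
def pvBLoop : List Char → List Char → List Char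
  | [], acc => acc
  | [_], acc => acc
  | x :: y :: t, acc => pvBLoop t (acc ++ [y, x])

-- r = hex[::-1] is the full reversal (PySem.List.slice?_none_none_neg_one).
def little_endian_alt (hex : String) : String :=
  if PySem.Int.mod (PySem.Str.len hex) 2 ≠ 0 then ""
  else String.ofList (pvBLoop hex.toList.reverse [])

-- ===== PRECONDITION & SPEC =====
def Spec_little_endian (hex : String) (out : String) : Prop := out = little_endian_alt hex
instance (hex : String) (out : String) : Decidable (Spec_little_endian hex out) := by unfold Spec_little_endian; infer_instance

-- ===== CLAIM (what is proved, stated in full; the proofs are below) =====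
def Claim_equal_little_endian : Prop := ∀ (hex : String), Dom_little_endian hex → Spec_little_endian hex (little_endian hex)

-- ===== LEMMAS AND PROOFS =====

-- byte-pair reversal taken from the FRONT: the common value of both loops
def pvPairRev : List Char → List Char
  | [] => []
  | [_] => []
  | a :: b :: t => pvPairRev t ++ [a, b]

-- per-pair swap taken from the front (B's loop without its accumulator)
def pvSwap2 : List Char → List Char
  | [] => []
  | [_] => []
  | x :: y :: t => y :: x :: pvSwap2 t

lemma pvBLoop_eq (l acc : List Char) : pvBLoop l acc = acc ++ pvSwap2 l := by
  induction l using pvSwap2.induct generalizing acc with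
  | case1 => simp [pvBLoop, pvSwap2]
  | case2 => simp [pvBLoop, pvSwap2]
  | case3 x y t ih => simp [pvBLoop, pvSwap2, ih]

lemma pvSwap2_append_pair (s : List Char) (b a : Char) (hs : s.length % 2 = 0) :
    pvSwap2 (s ++ [b, a]) = pvSwap2 s ++ [a, b] := by
  induction s using pvSwap2.induct with
  | case1 => simp [pvSwap2]
  | case2 => simp at hs
  | case3 x y t ih =>
      have ht : t.length % 2 = 0 := by simp at hs; omega
      simp [pvSwap2, ih ht]

lemma pvSwap2_reverse (l : List Char) (hl : l.length % 2 = 0) :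
    pvSwap2 l.reverse = pvPairRev l := by
  induction l using pvPairRev.induct with
  | case1 => simp [pvSwap2, pvPairRev]
  | case2 => simp at hl
  | case3 a b t ih =>
      have ht : t.length % 2 = 0 := by simp at hl; omega
      rw [show (a :: b :: t).reverse = t.reverse ++ [b, a] by simp,
        pvSwap2_append_pair _ _ _ (by simpa using ht), ih ht]
      simp [pvPairRev]

lemma pvPairRev_append_pair (s : List Char) (y x : Char) (hs : s.length % 2 = 0) :
    pvPairRev (s ++ [y, x]) = y :: x :: pvPairRev s := by
  induction s using pvPairRev.induct with
  | case1 => simp [pvPairRev]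
  | case2 => simp at hs
  | case3 a b t ih =>
      have ht : t.length % 2 = 0 := by simp at hs; omega
      simp only [List.cons_append, pvPairRev]
      rw [ih ht]; simp

lemma pvALoop_nil (fuel acc : List Char) : pvALoop fuel [] acc = acc := by
  induction fuel generalizing acc with
  | nil => rfl
  | cons f fs ih =>
      simp only [pvALoop, PySem.List.slice]
      simpa using ih acc

lemma pvALoop_eq (fuel cur acc : List Char) (hc : cur.length % 2 = 0)
    (hf : cur.length ≤ fuel.length) : pvALoop fuel cur acc = acc ++ pvPairRev cur := by
  induction fuel generalizing cur acc with
  | nil =>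
      have : cur = [] := by
        cases cur with
        | nil => rfl
        | cons a t => simp at hf
      subst this; simp [pvALoop, pvPairRev]
  | cons f fs ih =>
      cases hcur : cur.reverse with
      | nil =>
          have : cur = [] := by simpa using congrArg List.reverse hcur
          subst this; simp [pvALoop_nil, pvPairRev]
      | cons x rest =>
          cases rest with
          | nil =>
              -- cur has length 1, contradicting evenness
              have : cur.length = 1 := by
                have := congrArg List.length hcur; simpa using this
              omega
          | cons y t =>
              have hcur' : cur = t.reverse ++ [y, x] := by
                have := congrArg List.reverse hcur; simpa using this
              subst hcur'
              have hlen : (t.reverse ++ [y, x]).length = t.length + 2 := by simp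
              have hte : t.reverse.length % 2 = 0 := by simp at hc ⊢; omega
              simp only [pvALoop]
              rw [PySem.List.slice_to_neg_ofNat _ 2 (by omega),
                PySem.List.slice_from_neg_ofNat _ 2 (by omega)]
              have hdt : (t.reverse ++ [y, x]).length - 2 = t.reverse.length := by simp
              rw [hdt, List.take_left, List.drop_left]
              rw [ih t.reverse (acc ++ [y, x]) hte (by simp at hf ⊢; omega)]
              rw [pvPairRev_append_pair _ _ _ hte]
              simp

-- ===== VERDICT (by name: the statement is the Claim_ definition above) =====
theorem little_endian_spec : Claim_equal_little_endian := by
  intro hex _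
  unfold Spec_little_endian little_endian little_endian_alt
  have hm : PySem.Int.mod (PySem.Str.len hex) 2 = ((hex.toList.length % 2 : Nat) : Int) := by
    rw [PySem.Str.len_eq]; exact_mod_cast PySem.Int.mod_natCast hex.toList.length 2
  simp only [hm]
  by_cases hlen : hex.toList.length % 2 = 0
  · have h1 : ¬(((hex.toList.length % 2 : Nat) : Int) ≠ 0) := by
      simp only [ne_eq, not_not]; exact_mod_cast hlen
    rw [if_neg h1, if_neg h1,
      pvALoop_eq _ _ _ hlen (by simp), pvBLoop_eq, pvSwap2_reverse _ hlen]
  · have h1 : ((hex.toList.length % 2 : Nat) : Int) ≠ 0 := by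
      exact_mod_cast hlen
    rw [if_pos h1, if_pos h1]
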